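-- pv_equiv track=rewrite | github.com/Bobcatsoap/jy-server | cell/RoomType6Calculator.py | compare_sandaier
-- ===== SOURCE A (Python) =====
-- def compare_sandaier(cards1, cards2):
--     #     """
--     #     参数一是否大于参数二
--     #     :param cards1:
--     #     :param cards2:
--     #     :return:
--     #     """
--     cards1_three, cards2_three = 0, 0
--     cards1.sort()
--     cards2.sort()
--     for i in cards2:
--         if cards2.count(i) == 3:
--             cards2_three = i
--             break
--     for i in cards1:
--         if cards1.count(i) == 3:
--             cards1_three = i
--             break
--     return cards1_three > cards2_three
-- ===== SOURCE B (Python) =====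
-- def _triple(cards):
--     # single pass over the (sorted) list, tracking the current run
--     run_val, run_len = 0, 0
--     for v in cards:
--         if run_len > 0 and v == run_val:
--             run_len += 1
--         else:
--             if run_len == 3:
--                 return run_val
--             run_val, run_len = v, 1
--     return run_val if run_len == 3 else 0
--
--
-- def compare_sandaier(cards1, cards2):
--     cards1.sort()
--     cards2.sort()
--     return _triple(cards1) > _triple(cards2)
-- ===== Notes on version B (the rewrite author's own statement) =====
-- stated objective: faster
-- what changed: Replaces the per-element list.count inner scan with a single run-length pass over each sorted hand that finds the first value repeated exactly three times.
import Mathlib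
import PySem

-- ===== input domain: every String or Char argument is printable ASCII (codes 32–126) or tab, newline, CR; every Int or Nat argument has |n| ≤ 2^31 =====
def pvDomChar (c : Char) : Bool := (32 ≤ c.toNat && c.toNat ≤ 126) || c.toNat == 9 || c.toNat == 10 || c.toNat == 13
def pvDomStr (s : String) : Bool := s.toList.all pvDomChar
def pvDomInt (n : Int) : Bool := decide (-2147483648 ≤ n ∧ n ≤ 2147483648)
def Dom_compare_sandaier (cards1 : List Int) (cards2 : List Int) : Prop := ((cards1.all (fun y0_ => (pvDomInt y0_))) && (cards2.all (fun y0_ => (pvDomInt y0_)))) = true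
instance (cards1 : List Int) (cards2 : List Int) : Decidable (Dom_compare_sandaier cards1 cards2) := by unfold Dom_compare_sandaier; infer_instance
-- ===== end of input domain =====

-- B replaces A's per-element list.count scan with one run-length pass over each sorted hand (sort side effect kept); return-value equivalence is what is proved.


-- ===== PORT A =====
def findTripleA (full : List Int) : List Int → Int
  | [] => 0
  | i :: rest => if PySem.List.count full i = 3 then i else findTripleA full rest

def compare_sandaier (cards1 : List Int) (cards2 : List Int) : Bool :=
  let s1 := PySem.List.sorted cards1 (fun x => x) false
  let s2 := PySem.List.sorted cards2 (fun x => x) false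
  let cards2_three := findTripleA s2 s2
  let cards1_three := findTripleA s1 s1
  decide (cards1_three > cards2_three)

-- ===== PORT B =====
def scanRun (val : Int) (len : Nat) : List Int → Int
  | [] => if len = 3 then val else 0
  | v :: rest =>
    if v = val then scanRun val (len + 1) rest
    else if len = 3 then val else scanRun v 1 rest

def tripleAlt : List Int → Int
  | [] => 0
  | v :: rest => scanRun v 1 rest

def compare_sandaier_alt (cards1 : List Int) (cards2 : List Int) : Bool :=
  let s1 := PySem.List.sorted cards1 (fun x => x) false
  let s2 := PySem.List.sorted cards2 (fun x => x) false
  decide (tripleAlt s1 > tripleAlt s2)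

-- ===== PRECONDITION & SPEC =====
def Spec_compare_sandaier (cards1 : List Int) (cards2 : List Int) (out : Bool) : Prop := out = compare_sandaier_alt cards1 cards2
instance (cards1 : List Int) (cards2 : List Int) (out : Bool) : Decidable (Spec_compare_sandaier cards1 cards2 out) := by unfold Spec_compare_sandaier; infer_instance

-- ===== CLAIM (what is proved, stated in full; the proofs are below) =====
def Claim_equal_compare_sandaier : Prop := ∀ (cards1 : List Int) (cards2 : List Int), Dom_compare_sandaier cards1 cards2 → Spec_compare_sandaier cards1 cards2 (compare_sandaier cards1 cards2)

-- ===== LEMMAS AND PROOFS =====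

lemma findA_congr (l t : List Int) : ∀ m : List Int,
    (∀ x ∈ m, PySem.List.count l x = PySem.List.count t x) →
    findTripleA l m = findTripleA t m := by
  intro m
  induction m with
  | nil => intro _; rfl
  | cons a m ih =>
      intro h
      simp only [findTripleA, h a (by simp)]
      split
      · rfl
      · exact ih (fun x hx => h x (by simp [hx]))

lemma findA_skip (l : List Int) (v : Int) (h : PySem.List.count l v ≠ 3) :
    ∀ (j : Nat) (m : List Int), findTripleA l (List.replicate j v ++ m) = findTripleA l m := by
  intro j
  induction j with
  | zero => intro m; rfl
  | succ j ih => intro m; simp only [List.replicate_succ, List.cons_append, findTripleA, if_neg h, ih]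

lemma scanRun_replicate (v : Int) : ∀ (j : Nat) (m : Nat) (t : List Int),
    scanRun v m (List.replicate j v ++ t) = scanRun v (m + j) t := by
  intro j
  induction j with
  | zero => intro m t; rfl
  | succ j ih =>
      intro m t
      have h : m + 1 + j = m + (j + 1) := by omega
      simp [List.replicate_succ, scanRun, ih, h]

lemma triple_eq : ∀ (n : Nat) (l : List Int), l.length ≤ n → l.Pairwise (· ≤ ·) →
    tripleAlt l = findTripleA l l := by
  intro n
  induction n with
  | zero =>
      intro l hl _
      match l, hl with
      | [], _ => rfl
  | succ n ih =>
      intro l hl hsort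
      match l, hl, hsort with
      | [], _, _ => rfl
      | v :: rest, hl, hsort =>
        have hvle : ∀ x ∈ rest, v ≤ x := (List.pairwise_cons.mp hsort).1
        have hrest : rest.Pairwise (· ≤ ·) := (List.pairwise_cons.mp hsort).2
        have hgrep : rest.takeWhile (fun x => x == v) =
            List.replicate (rest.takeWhile (fun x => x == v)).length v := by
          apply List.eq_replicate_of_mem
          intro x hx
          simpa using List.mem_takeWhile_imp hx
        rcases hdw : rest.dropWhile (fun x => x == v) with _ | ⟨w, t'⟩
        · -- the whole tail is one block of v's
          have hsplit : rest = rest.takeWhile (fun x => x == v) := by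
            conv_lhs => rw [← List.takeWhile_append_dropWhile (p := fun x => x == v) (l := rest)]
            rw [hdw, List.append_nil]
          have hcount : PySem.List.count (v :: rest) v =
              (rest.takeWhile (fun x => x == v)).length + 1 := by
            rw [PySem.List.count_eq]
            conv_lhs => rw [hsplit, hgrep]
            simp
          have hB : tripleAlt (v :: rest) =
              if (rest.takeWhile (fun x => x == v)).length + 1 = 3 then v else 0 := by
            show scanRun v 1 rest = _
            conv_lhs => rw [hsplit, hgrep, show List.replicate (rest.takeWhile (fun x => x == v)).length v = List.replicate (rest.takeWhile (fun x => x == v)).length v ++ [] from (List.append_nil _).symm]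
            rw [scanRun_replicate]
            have h1 : 1 + (rest.takeWhile (fun x => x == v)).length =
                (rest.takeWhile (fun x => x == v)).length + 1 := by omega
            rw [h1]
            rfl
          have hA : findTripleA (v :: rest) (v :: rest) =
              if (rest.takeWhile (fun x => x == v)).length + 1 = 3 then v else 0 := by
            by_cases h3 : (rest.takeWhile (fun x => x == v)).length + 1 = 3
            · simp only [findTripleA, hcount, if_pos h3]
            · have hcne : PySem.List.count (v :: rest) v ≠ 3 := by rw [hcount]; exact h3
              simp only [findTripleA, if_neg hcne, if_neg h3]
              rw [show findTripleA (v :: rest) rest =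
                    findTripleA (v :: rest) (List.replicate (rest.takeWhile (fun x => x == v)).length v ++ []) from by
                  rw [List.append_nil, ← hgrep, ← hsplit]]
              rw [findA_skip _ _ hcne]
              rfl
          rw [hB, hA]
        · -- a later, strictly larger value follows the leading block
          have hsplit : rest = rest.takeWhile (fun x => x == v) ++ w :: t' := by
            conv_lhs => rw [← List.takeWhile_append_dropWhile (p := fun x => x == v) (l := rest)]
            rw [hdw]
          have htsub : (w :: t').Sublist rest := by
            rw [← hdw]; exact List.dropWhile_sublist _
          have hwne : w ≠ v := by
            have hne : rest.dropWhile (fun x => x == v) ≠ [] := by rw [hdw]; simp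
            have := List.head_dropWhile_not (fun x => x == v) hne
            have hh : (rest.dropWhile (fun x => x == v)).head hne = w := by
              simp [hdw]
            rw [hh] at this
            simpa using this
          have hwrest : w ∈ rest := htsub.mem (by simp)
          have hvw : v < w := lt_of_le_of_ne (hvle w hwrest) (Ne.symm hwne)
          have htsort : (w :: t').Pairwise (· ≤ ·) := hrest.sublist htsub
          have hvt : v ∉ w :: t' := by
            intro hmem
            rcases List.mem_cons.mp hmem with h1 | h1
            · exact hwne h1.symm
            · have := (List.pairwise_cons.mp htsort).1 v h1
              omega
          have htlen : (w :: t').length ≤ n := by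
            have h1 := htsub.length_le
            simp only [List.length_cons] at hl
            omega
          have hIH : tripleAlt (w :: t') = findTripleA (w :: t') (w :: t') :=
            ih (w :: t') htlen htsort
          have hcount0 : (w :: t').count v = 0 := List.count_eq_zero.mpr hvt
          have hcount : PySem.List.count (v :: rest) v =
              (rest.takeWhile (fun x => x == v)).length + 1 := by
            rw [PySem.List.count_eq]
            conv_lhs => rw [hsplit, hgrep]
            simp [hcount0]
          have hB : tripleAlt (v :: rest) =
              if (rest.takeWhile (fun x => x == v)).length + 1 = 3 then v else tripleAlt (w :: t') := by
            show scanRun v 1 rest = _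
            conv_lhs => rw [hsplit, hgrep]
            rw [scanRun_replicate]
            have h1 : 1 + (rest.takeWhile (fun x => x == v)).length =
                (rest.takeWhile (fun x => x == v)).length + 1 := by omega
            rw [h1]
            simp only [scanRun, if_neg hwne, tripleAlt]
          have hA : findTripleA (v :: rest) (v :: rest) =
              if (rest.takeWhile (fun x => x == v)).length + 1 = 3 then v else findTripleA (w :: t') (w :: t') := by
            by_cases h3 : (rest.takeWhile (fun x => x == v)).length + 1 = 3
            · simp only [findTripleA, hcount, if_pos h3]
            · have hcne : PySem.List.count (v :: rest) v ≠ 3 := by rw [hcount]; exact h3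
              simp only [findTripleA, if_neg hcne, if_neg h3]
              rw [show findTripleA (v :: rest) rest =
                    findTripleA (v :: rest) (List.replicate (rest.takeWhile (fun x => x == v)).length v ++ (w :: t')) from by
                  rw [← hgrep, ← hsplit]]
              rw [findA_skip _ _ hcne]
              apply findA_congr
              intro x hx
              have hxv : x ≠ v := fun hEq => hvt (hEq ▸ hx)
              rw [PySem.List.count_eq, PySem.List.count_eq, hsplit]
              simp [List.count_cons, List.count_append, Ne.symm hxv]
              rw [hgrep]
              simp [List.count_replicate, Ne.symm hxv]
          rw [hB, hA, hIH]

-- ===== VERDICT (by name: the statement is the Claim_ definition above) =====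
theorem compare_sandaier_spec : Claim_equal_compare_sandaier := by
  intro cards1 cards2 _
  unfold Spec_compare_sandaier compare_sandaier compare_sandaier_alt
  have h1 := triple_eq (PySem.List.sorted cards1 (fun x => x) false).length _ le_rfl
      (by simpa using PySem.List.sorted_pairwise cards1 (fun x => x))
  have h2 := triple_eq (PySem.List.sorted cards2 (fun x => x) false).length _ le_rfl
      (by simpa using PySem.List.sorted_pairwise cards2 (fun x => x))
  simp only [h1, h2]
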